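-- pv_equiv track=rewrite | github.com/abhipec/HAnDS | src/models/corenlp/src/corenlp_ner_tagger.py | output_to_IOB2_string
-- ===== SOURCE A (Python) =====
-- def output_to_IOB2_string(output):
--     """
--     Convert Stanford NER tags to IOB2 tags.
--     """
--     iob2_tags = []
--     names = []
--     previous_tag = 'O'
--     for _, tup in enumerate(output):
--         name, tag = tup
--         if tag != 'O':
--             tag = 'E'
--
--         if tag == 'O':
--             iob2_tags.append(tag)
--             previous_tag = tag
--             names.append(name)
--         else:
--             if previous_tag == 'O':
--                 iob2_tags.append('B-' + tag)
--             else: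
--                 iob2_tags.append('I-' + tag)
--             previous_tag = tag
--             names.append(name)
--     return names, iob2_tags
-- ===== SOURCE B (Python) =====
-- def output_to_IOB2_string(output):
--     """
--     Convert Stanford NER tags to IOB2 tags.
--     """
--     names = []
--     norm = []
--     for tup in output:
--         name, tag = tup
--         names.append(name)
--         norm.append('O' if tag == 'O' else 'E')
--     prevs = ['O'] + norm[:-1]
--     iob2_tags = [t if t == 'O' else ('B-E' if p == 'O' else 'I-E')
--                  for t, p in zip(norm, prevs)]
--     return names, iob2_tags
-- ===== Notes on version B (the rewrite author's own statement) =====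
-- stated objective: alternative
-- what changed: Replaces the single pass with a running previous_tag accumulator by a two-phase scheme: one pass building names and a normalized O/E tag list, then a stateless zip of each normalized tag with its predecessor to emit O/B-E/I-E.
import Mathlib
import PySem

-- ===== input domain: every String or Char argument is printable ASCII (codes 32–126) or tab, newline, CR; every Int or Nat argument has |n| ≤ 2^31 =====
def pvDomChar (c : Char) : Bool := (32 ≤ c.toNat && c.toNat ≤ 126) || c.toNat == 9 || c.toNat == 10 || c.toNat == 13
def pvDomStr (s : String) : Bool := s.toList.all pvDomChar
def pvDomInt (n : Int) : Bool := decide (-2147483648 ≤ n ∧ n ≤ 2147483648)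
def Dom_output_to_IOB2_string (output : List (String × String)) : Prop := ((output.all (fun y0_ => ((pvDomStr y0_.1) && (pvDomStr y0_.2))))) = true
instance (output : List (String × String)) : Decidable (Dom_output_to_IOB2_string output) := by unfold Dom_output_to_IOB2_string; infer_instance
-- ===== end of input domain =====

-- B restructures A's single stateful pass into (1) a pass building names and normalized O/E tags, (2) a stateless predecessor-zip; same output, same cost (objective: alternative).

-- ===== PORT A =====
-- A's for-loop with the running previous_tag, as a foldl over state (iob2_tags, names, previous_tag).
def output_to_IOB2_string (output : List (String × String)) : List String × List String :=
  let st := output.foldl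
    (fun (st : List String × List String × String) tup =>
      let iob2_tags := st.1
      let names := st.2.1
      let previous_tag := st.2.2
      let name := tup.1
      let tag0 := tup.2
      let tag := if tag0 ≠ "O" then "E" else tag0
      if tag == "O" then
        (iob2_tags ++ [tag], names ++ [name], tag)
      else
        if previous_tag == "O" then
          (iob2_tags ++ ["B-" ++ tag], names ++ [name], tag)
        else
          (iob2_tags ++ ["I-" ++ tag], names ++ [name], tag))
    ([], [], "O")
  (st.2.1, st.1)

-- ===== PORT B =====
def output_to_IOB2_string_alt (output : List (String × String)) : List String × List String :=
  let names := output.map (fun tup => tup.1)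
  let norm := output.map (fun tup => if tup.2 == "O" then "O" else "E")
  let prevs := "O" :: norm.dropLast
  let iob2_tags := (norm.zip prevs).map
    (fun tp => if tp.1 == "O" then tp.1 else if tp.2 == "O" then "B-E" else "I-E")
  (names, iob2_tags)

-- ===== PRECONDITION & SPEC =====
def Spec_output_to_IOB2_string (output : List (String × String)) (out : List String × List String) : Prop := out = output_to_IOB2_string_alt output
instance (output : List (String × String)) (out : List String × List String) : Decidable (Spec_output_to_IOB2_string output out) := by unfold Spec_output_to_IOB2_string; infer_instance

-- ===== CLAIM (what is proved, stated in full; the proofs are below) =====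
def Claim_equal_output_to_IOB2_string : Prop := ∀ (output : List (String × String)), Dom_output_to_IOB2_string output → Spec_output_to_IOB2_string output (output_to_IOB2_string output)

-- ===== LEMMAS AND PROOFS =====

-- reference tag sequence, parameterized by the incoming previous (normalized) tag
def pvTags : List (String × String) → String → List String
  | [], _ => []
  | (_, t) :: rest, p =>
      let t' := if t == "O" then "O" else "E"
      (if t' == "O" then "O" else if p == "O" then "B-E" else "I-E") :: pvTags rest t'

def pvLast : List (String × String) → String → String
  | [], p => p
  | (_, t) :: rest, _ => pvLast rest (if t == "O" then "O" else "E")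

theorem pvA_fold (l : List (String × String)) :
    ∀ (iob2 names : List String) (prev : String),
    l.foldl
      (fun (st : List String × List String × String) tup =>
        let iob2_tags := st.1
        let names := st.2.1
        let previous_tag := st.2.2
        let name := tup.1
        let tag0 := tup.2
        let tag := if tag0 ≠ "O" then "E" else tag0
        if tag == "O" then
          (iob2_tags ++ [tag], names ++ [name], tag)
        else
          if previous_tag == "O" then
            (iob2_tags ++ ["B-" ++ tag], names ++ [name], tag)
          else
            (iob2_tags ++ ["I-" ++ tag], names ++ [name], tag))
      (iob2, names, prev)
    = (iob2 ++ pvTags l prev, names ++ l.map (fun tup => tup.1), pvLast l prev) := by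
  induction l with
  | nil => intro iob2 names prev; simp [pvTags, pvLast]
  | cons hd tl ih =>
      intro iob2 names prev
      obtain ⟨n, t⟩ := hd
      rw [List.foldl_cons]
      by_cases h : t = "O"
      · subst h
        simpa [pvTags, pvLast, List.append_assoc] using ih (iob2 ++ ["O"]) (names ++ [n]) "O"
      · by_cases hp : prev = "O"
        · subst hp
          simpa [pvTags, pvLast, h, List.append_assoc] using ih (iob2 ++ ["B-E"]) (names ++ [n]) "E"
        · simpa [pvTags, pvLast, h, hp, List.append_assoc] using ih (iob2 ++ ["I-E"]) (names ++ [n]) "E"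

theorem pv_zip_dropLast (xs : List String) :
    ∀ (p : String), xs.zip (p :: xs.dropLast) = xs.zip (p :: xs) := by
  induction xs with
  | nil => intro p; simp
  | cons a as ih =>
      intro p
      cases as with
      | nil => simp
      | cons b bs =>
          rw [List.dropLast_cons₂, List.zip_cons_cons, ih a]
          simp [List.zip_cons_cons]

theorem pvB_tags (l : List (String × String)) :
    ∀ (p : String),
    ((l.map (fun tup => if tup.2 == "O" then "O" else "E")).zip
        (p :: (l.map (fun tup => if tup.2 == "O" then "O" else "E")).dropLast)).map
      (fun tp => if tp.1 == "O" then tp.1 else if tp.2 == "O" then "B-E" else "I-E")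
    = pvTags l p := by
  induction l with
  | nil => intro p; simp [pvTags]
  | cons hd tl ih =>
      intro p
      obtain ⟨n, t⟩ := hd
      rw [List.map_cons, pv_zip_dropLast, List.zip_cons_cons, List.map_cons,
        ← pv_zip_dropLast, ih]
      by_cases h : t = "O"
      · subst h; simp [pvTags]
      · have hb : (t == "O") = false := by simp [h]
        by_cases hp : p = "O"
        · subst hp; simp [pvTags, hb]
        · have hpb : (p == "O") = false := by simp [hp]
          simp [pvTags, hb, hpb]

-- ===== VERDICT (by name: the statement is the Claim_ definition above) =====
theorem output_to_IOB2_string_spec : Claim_equal_output_to_IOB2_string := by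
  intro output _
  unfold Spec_output_to_IOB2_string output_to_IOB2_string output_to_IOB2_string_alt
  rw [pvA_fold output [] [] "O"]
  dsimp only
  rw [List.nil_append, List.nil_append, ← pvB_tags output "O"]
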